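-- pv_equiv track=rewrite | github.com/Mabalzich/PythonBasicDataAnalysis | main.py | most_sparse
-- ===== SOURCE A (Python) =====
-- def most_sparse(sparse,c):
--     #calculates the top 3 most sparse variables
--     top = {}
--     for key, value in sparse.items():
--         if len(top) >= 3 and c - value > list(top.values())[-1]: #more sparse variables will have a lower frequency
--             top.popitem()
--             top[key] = c - value
--             top = dict(sorted(top.items(), key = lambda x: x[1], reverse = True)) #keeps the list in descending order
--         elif len(top) < 3: #initially populates the list
--             top[key] = c - value
--             top = dict(sorted(top.items(), key = lambda x: x[1], reverse = True))
--     return list(top.keys())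
-- ===== SOURCE B (Python) =====
-- def most_sparse(sparse, c):
--     # single stable sort by sparseness score, descending; keys of the top 3
--     scored = sorted(((k, c - v) for k, v in sparse.items()), key=lambda p: p[1], reverse=True)
--     return [k for k, _ in scored[:3]]
-- ===== Notes on version B (the rewrite author's own statement) =====
-- stated objective: simpler
-- what changed: A incrementally maintains a top-3 dict, popping its minimum and re-sorting the 3-element dict at every step; B scores all items once, does a single stable descending sort and takes the first three keys.
import Mathlib
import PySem

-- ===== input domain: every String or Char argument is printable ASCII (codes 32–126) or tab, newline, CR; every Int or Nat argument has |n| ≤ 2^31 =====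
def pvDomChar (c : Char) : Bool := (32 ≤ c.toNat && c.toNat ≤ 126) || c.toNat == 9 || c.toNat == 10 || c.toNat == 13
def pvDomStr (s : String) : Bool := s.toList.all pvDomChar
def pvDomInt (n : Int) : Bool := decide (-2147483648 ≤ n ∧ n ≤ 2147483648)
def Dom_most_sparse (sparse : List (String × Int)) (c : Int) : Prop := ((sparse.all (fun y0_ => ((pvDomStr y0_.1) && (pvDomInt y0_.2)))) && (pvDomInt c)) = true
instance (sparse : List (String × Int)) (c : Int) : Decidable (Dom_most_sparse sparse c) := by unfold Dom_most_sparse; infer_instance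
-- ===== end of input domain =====

-- B replaces A's incremental top-3 maintenance (re-sorting a ≤3-element dict each step)
-- by one stable descending sort of all scored items followed by take-3: simpler and plainer.


-- ===== PORT A =====
-- The dict parameter arrives as an association list; dict construction (later duplicate
-- keys overwrite in place) is modelled by PySem.Dict.ofList, then A iterates .items().
-- `top` is kept as the dict's item list (its keys are distinct, so top[key] = … appends
-- and popitem() drops the last item); dict(sorted(...)) is PySem.List.sorted on the items.
def msStepA (c : Int) (top : List (String × Int)) (kv : String × Int) : List (String × Int) :=
  let s := c - kv.2
  -- list(top.values())[-1]: guarded by 3 ≤ top.length, so getLast? is always `some` there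
  if 3 ≤ top.length ∧ ((top.map (fun p => p.2)).getLast?.getD s < s) then
    PySem.List.sorted (top.dropLast ++ [(kv.1, s)]) (fun p => p.2) true
  else if top.length < 3 then
    PySem.List.sorted (top ++ [(kv.1, s)]) (fun p => p.2) true
  else top

def most_sparse (sparse : List (String × Int)) (c : Int) : List String :=
  let top := ((PySem.Dict.ofList sparse).items).foldl (msStepA c) []
  top.map (fun p => p.1)

-- ===== PORT B =====
def most_sparse_alt (sparse : List (String × Int)) (c : Int) : List String :=
  let scored := PySem.List.sorted
    (((PySem.Dict.ofList sparse).items).map (fun kv => (kv.1, c - kv.2)))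
    (fun p => p.2) true
  (scored.take 3).map (fun p => p.1)

-- ===== PRECONDITION & SPEC =====
def Spec_most_sparse (sparse : List (String × Int)) (c : Int) (out : List String) : Prop := out = most_sparse_alt sparse c
instance (sparse : List (String × Int)) (c : Int) (out : List String) : Decidable (Spec_most_sparse sparse c out) := by unfold Spec_most_sparse; infer_instance

-- ===== CLAIM (what is proved, stated in full; the proofs are below) =====
def Claim_equal_most_sparse : Prop := ∀ (sparse : List (String × Int)) (c : Int), Dom_most_sparse sparse c → Spec_most_sparse sparse c (most_sparse sparse c)

-- ===== LEMMAS AND PROOFS =====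

-- the comparator of the reverse stable sort keyed by the second component
def msBefore (a b : String × Int) : Bool := decide (b.2 < a.2)

lemma msSorted_eq_foldl (xs : List (String × Int)) :
    PySem.List.sorted xs (fun p => p.2) true
      = xs.foldl (fun acc x => PySem.List.insertBy msBefore x acc) [] := rfl

lemma msSorted_append_singleton (xs : List (String × Int)) (y : String × Int) :
    PySem.List.sorted (xs ++ [y]) (fun p => p.2) true
      = PySem.List.insertBy msBefore y (PySem.List.sorted xs (fun p => p.2) true) := by
  simp [msSorted_eq_foldl, List.foldl_append]

lemma msInsert_pairwise (acc : List (String × Int)) (y : String × Int)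
    (h : acc.Pairwise (fun a b => b.2 ≤ a.2)) :
    (PySem.List.insertBy msBefore y acc).Pairwise (fun a b => b.2 ≤ a.2) := by
  have he : PySem.List.sorted acc (fun p => p.2) true = acc :=
    PySem.List.sorted_rev_eq_self_of_pairwise _ _ h
  have hs := PySem.List.sorted_pairwise_rev (xs := acc ++ [y]) (key := fun p => p.2)
  rwa [msSorted_append_singleton, he] at hs

-- one loop step of A on the sorted 3-prefix equals insert-then-take-3
lemma msStep_take (c : Int) (acc : List (String × Int)) (kv : String × Int)
    (h : acc.Pairwise (fun a b => b.2 ≤ a.2)) :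
    msStepA c (acc.take 3) kv
      = (PySem.List.insertBy msBefore (kv.1, c - kv.2) acc).take 3 := by
  match acc, h with
  | [], _ => simp [msStepA, PySem.List.sorted, PySem.List.insertBy]
  | [a], _ =>
    by_cases hb : a.2 < c - kv.2 <;>
      simp [msStepA, PySem.List.sorted, PySem.List.insertBy, msBefore, hb]
  | [a, b], hp =>
    have hba : b.2 ≤ a.2 := by
      have := List.pairwise_cons.mp hp; exact this.1 b (by simp)
    have hab : ¬ a.2 < b.2 := not_lt.mpr hba
    by_cases h1 : b.2 < c - kv.2
    · by_cases h2 : a.2 < c - kv.2 <;>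
        simp [msStepA, PySem.List.sorted, PySem.List.insertBy, msBefore, hab, h1, h2]
    · have h2 : ¬ a.2 < c - kv.2 := fun h2 => h1 (lt_of_le_of_lt hba h2)
      simp [msStepA, PySem.List.sorted, PySem.List.insertBy, msBefore, hab, h1, h2]
  | a :: b :: e :: rest, hp =>
    obtain ⟨ha, hp2⟩ := List.pairwise_cons.mp hp
    obtain ⟨hb2, _⟩ := List.pairwise_cons.mp hp2
    have hba : b.2 ≤ a.2 := ha b (by simp)
    have hea : e.2 ≤ a.2 := ha e (by simp)
    have heb : e.2 ≤ b.2 := hb2 e (by simp)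
    have hab : ¬ a.2 < b.2 := not_lt.mpr hba
    by_cases h3 : e.2 < c - kv.2
    · by_cases h2 : b.2 < c - kv.2
      · by_cases h1 : a.2 < c - kv.2 <;>
          simp [msStepA, PySem.List.sorted, PySem.List.insertBy, msBefore,
            hab, h1, h2, h3]
      · have h1 : ¬ a.2 < c - kv.2 := fun h1 => h2 (lt_of_le_of_lt hba h1)
        simp [msStepA, PySem.List.sorted, PySem.List.insertBy, msBefore,
          hab, h1, h2, h3]
    · have h1 : ¬ a.2 < c - kv.2 := not_lt.mpr (le_trans (not_lt.mp h3) hea)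
      have h2 : ¬ b.2 < c - kv.2 := not_lt.mpr (le_trans (not_lt.mp h3) heb)
      simp [msStepA, PySem.List.insertBy, msBefore, h1, h2, h3]

-- the loop invariant, generalized over a sorted accumulator
lemma msMain (c : Int) (items : List (String × Int)) :
    ∀ (acc : List (String × Int)), acc.Pairwise (fun a b => b.2 ≤ a.2) →
      items.foldl (msStepA c) (acc.take 3)
        = (items.foldl
            (fun l x => PySem.List.insertBy msBefore (x.1, c - x.2) l) acc).take 3 := by
  induction items with
  | nil => intro acc _; simp
  | cons x xs ih =>
    intro acc h
    simp only [List.foldl_cons]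
    rw [msStep_take c acc x h]
    exact ih _ (msInsert_pairwise acc _ h)

-- ===== VERDICT (by name: the statement is the Claim_ definition above) =====
theorem most_sparse_spec : Claim_equal_most_sparse := by
  intro sparse c _
  unfold Spec_most_sparse most_sparse most_sparse_alt
  have hmap : PySem.List.sorted
      (((PySem.Dict.ofList sparse).items).map (fun kv => (kv.1, c - kv.2)))
      (fun p => p.2) true
      = ((PySem.Dict.ofList sparse).items).foldl
          (fun l x => PySem.List.insertBy msBefore (x.1, c - x.2) l) [] := by
    rw [msSorted_eq_foldl, List.foldl_map]
  have h0 : ((PySem.Dict.ofList sparse).items).foldl (msStepA c) []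
      = (((PySem.Dict.ofList sparse).items).foldl
          (fun l x => PySem.List.insertBy msBefore (x.1, c - x.2) l) []).take 3 := by
    simpa using msMain c ((PySem.Dict.ofList sparse).items) [] (by simp)
  rw [hmap, h0]
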